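-- pv_equiv track=rewrite | github.com/ThangPham-02/learning-python | Biến_đổi_dãy_số.py | check
-- ===== SOURCE A (Python) =====
-- def check(a, cnt):
--     b = []
--     for i in range(len(a) - 1):
--         b.append(abs(a[i] - a[i+1]))
--         if i == 2:
--             b.append(abs(a[3] - a[0]))
--     if b == [0, 0, 0, 0]:
--         return cnt
--     else:
--         cnt += 1
--         return check(b, cnt)
-- ===== SOURCE B (Python) =====
-- def check(a, cnt):
--     # iterative Ducci on an explicit 4-tuple: destructure, take cyclic
--     # neighbour differences, stop when the tuple is all zeros
--     while True:
--         w, x, y, z = a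
--         a = [abs(w - x), abs(x - y), abs(y - z), abs(z - w)]
--         if not any(a):
--             return cnt
--         cnt += 1
-- ===== Notes on version B (the rewrite author's own statement) =====
-- stated objective: simpler
-- what changed: The recursion with an indexed loop that appends the wrap-around term mid-loop is replaced by a while loop that destructures the 4-tuple and writes the four cyclic differences directly, stopping when the tuple is all zeros.
import Mathlib
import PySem

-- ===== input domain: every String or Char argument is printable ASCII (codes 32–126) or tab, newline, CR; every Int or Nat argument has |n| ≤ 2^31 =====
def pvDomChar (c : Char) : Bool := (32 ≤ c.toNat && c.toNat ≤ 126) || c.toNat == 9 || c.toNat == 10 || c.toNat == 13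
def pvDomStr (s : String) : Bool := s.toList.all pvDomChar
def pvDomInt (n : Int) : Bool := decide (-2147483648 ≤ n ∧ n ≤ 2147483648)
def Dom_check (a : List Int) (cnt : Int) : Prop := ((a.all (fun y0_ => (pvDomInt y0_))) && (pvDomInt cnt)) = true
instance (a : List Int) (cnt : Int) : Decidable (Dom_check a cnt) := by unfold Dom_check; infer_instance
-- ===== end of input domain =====

-- B is an iterative reformulation (zip-with-rotation Ducci step, stop when all zeros);
-- equivalence is about the return value on length-4 inputs, where A always returns.

-- ===== PORT A =====
-- one level of A's recursion: build b by the indexed loop (indices are always in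
-- range where the Python reads them, so getD is exact there)
def buildB (a : List Int) : List Int :=
  (List.range (a.length - 1)).foldl (fun b i =>
    let b := b ++ [|a.getD i 0 - a.getD (i+1) 0|]
    if i = 2 then b ++ [|a.getD 3 0 - a.getD 0 0|] else b) []

-- A's recursion, made total with a fuel counter (a totality guard only: on the
-- claimed inputs the recursion terminates long before the fuel runs out)
def checkLoopA : Nat → List Int → Int → Int
  | 0, _, cnt => cnt
  | fuel+1, a, cnt =>
    let b := buildB a
    if b = [0, 0, 0, 0] then cnt else checkLoopA fuel b (cnt + 1)

def check (a : List Int) (cnt : Int) : Int := checkLoopA 200 a cnt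

-- ===== PORT B =====
-- B's while-True loop, with the same totality fuel guard; 'w, x, y, z = a' raises
-- ValueError on any other length (the wildcard default is outside Pre_check)
def checkLoopB : Nat → List Int → Int → Int
  | 0, _, cnt => cnt
  | fuel+1, a, cnt =>
    match a with
    | [w, x, y, z] =>
      let b := [|w - x|, |x - y|, |y - z|, |z - w|]
      if b.all (fun v => v == 0) then cnt else checkLoopB fuel b (cnt + 1)
    | _ => cnt

def check_alt (a : List Int) (cnt : Int) : Int := checkLoopB 200 a cnt

-- ===== PRECONDITION & SPEC =====
-- Pre_ excludes only inputs where A never returns: for any length other than 4 the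
-- Python A recurses forever (RecursionError) since b is never the literal [0,0,0,0].
def Pre_check (a : List Int) (cnt : Int) : Prop := a.length = 4
instance (a : List Int) (cnt : Int) : Decidable (Pre_check a cnt) := by unfold Pre_check; infer_instance
def pvWitness_check : List Int × Int := ([0, 1, 2, 3], 0)

def Spec_check (a : List Int) (cnt : Int) (out : Int) : Prop := out = check_alt a cnt
instance (a : List Int) (cnt : Int) (out : Int) : Decidable (Spec_check a cnt out) := by unfold Spec_check; infer_instance

-- ===== CLAIM (what is proved, stated in full; the proofs are below) =====
def Claim_equal_check : Prop := ∀ (a : List Int) (cnt : Int), Dom_check a cnt → Pre_check a cnt → Spec_check a cnt (check a cnt)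

-- ===== LEMMAS AND PROOFS =====

lemma buildB_four (p q r s : Int) :
    buildB [p, q, r, s] = [|p - q|, |q - r|, |r - s|, |s - p|] := by
  show (List.range 3).foldl _ [] = _
  simp [List.range_succ]

lemma loops_eq (fuel : Nat) : ∀ (a : List Int) (cnt : Int), a.length = 4 →
    checkLoopA fuel a cnt = checkLoopB fuel a cnt := by
  induction fuel with
  | zero => intro a cnt _; rfl
  | succ n ih =>
    intro a cnt h
    match a, h with
    | [p, q, r, s], _ =>
      have hA := buildB_four p q r s
      show (if buildB [p,q,r,s] = [0,0,0,0] then cnt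
            else checkLoopA n (buildB [p,q,r,s]) (cnt+1)) =
           (if ([|p - q|, |q - r|, |r - s|, |s - p|] : List Int).all (fun v => v == 0) then cnt
            else checkLoopB n [|p - q|, |q - r|, |r - s|, |s - p|] (cnt+1))
      rw [hA]
      have hcond : ([|p - q|, |q - r|, |r - s|, |s - p|] = ([0,0,0,0] : List Int)) ↔
          (([|p - q|, |q - r|, |r - s|, |s - p|] : List Int).all (fun v => v == 0) = true) := by
        simp
      by_cases hz : ([|p - q|, |q - r|, |r - s|, |s - p|] = ([0,0,0,0] : List Int))
      · rw [if_pos hz, if_pos (hcond.mp hz)]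
      · rw [if_neg hz, if_neg (fun hb => hz (hcond.mpr hb))]
        exact ih _ _ rfl

-- ===== VERDICT (by name: the statement is the Claim_ definition above) =====
theorem check_spec : Claim_equal_check := by
  intro a cnt _ hpre
  show check a cnt = check_alt a cnt
  exact loops_eq 200 a cnt hpre
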